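-- pv_equiv track=rewrite | github.com/osvaz/Generador-de-texto-aleatorio | Generador_texto_aleatorio.py | crear_valores_nivel_2
-- ===== SOURCE A (Python) =====
-- def crear_valores_nivel_2(texto, claves_alfabeto):
--
-- 	valores_nivel_2 = []
-- 	# inicializamos a 0
-- 	for i,a in enumerate(claves_alfabeto):
-- 		valores_nivel_2.append([])
-- 		for b in claves_alfabeto:
-- 			valores_nivel_2[i].append(0)
--
-- 	# introduce el numero de veces que aparece un caracter seguido de otro
-- 	for i,a in enumerate(claves_alfabeto):
-- 		for j,b in enumerate(texto[:-1]): # excluimos el ultimo caracter del texto porque no tiene caracter siguiente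
-- 			if a == b:
-- 				for k,c in enumerate(claves_alfabeto):
-- 					if c == texto[j+1]:
-- 						valores_nivel_2[i][k] += 1
--
-- 	return valores_nivel_2
-- ===== SOURCE B (Python) =====
-- def crear_valores_nivel_2(texto, claves_alfabeto):
-- 	# one pass: count each adjacent bigram once, then read the counts off per alphabet pair
-- 	conteo = {}
-- 	for x, y in zip(texto, texto[1:]):
-- 		conteo[(x, y)] = conteo.get((x, y), 0) + 1
-- 	return [[conteo.get((a, c), 0) for c in claves_alfabeto] for a in claves_alfabeto]
-- ===== Notes on version B (the rewrite author's own statement) =====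
-- stated objective: faster
-- what changed: B replaces A's O(A*N*A) nested scans (for each alphabet letter, scan the text, and for each match scan the alphabet again) by one pass over the text that counts each adjacent bigram in a dictionary, then fills the matrix with O(1) lookups.
import Mathlib
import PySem

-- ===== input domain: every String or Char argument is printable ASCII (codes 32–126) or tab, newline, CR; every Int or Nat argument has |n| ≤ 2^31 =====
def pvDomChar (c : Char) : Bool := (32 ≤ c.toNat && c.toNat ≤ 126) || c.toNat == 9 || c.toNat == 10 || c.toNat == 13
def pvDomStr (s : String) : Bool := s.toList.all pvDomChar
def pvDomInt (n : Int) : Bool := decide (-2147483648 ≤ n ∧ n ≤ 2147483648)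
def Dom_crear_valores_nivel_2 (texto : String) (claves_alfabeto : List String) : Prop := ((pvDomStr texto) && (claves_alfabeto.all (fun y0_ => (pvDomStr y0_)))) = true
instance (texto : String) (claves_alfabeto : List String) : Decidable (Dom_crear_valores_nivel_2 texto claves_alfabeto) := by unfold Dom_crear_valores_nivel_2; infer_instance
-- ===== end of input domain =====

-- ===== PORT A =====
-- B replaces A's nested alphabet×text×alphabet scans with a single pass over the text
-- counting each adjacent bigram once into a dictionary, then a table of lookups (objective: faster).
-- A-side helpers (pieces of the literal transliteration of A's loops)
-- 'for i,a in enumerate(claves_alfabeto): valores.append([]); for b in claves_alfabeto: valores[i].append(0)'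
def pvA_init (claves : List String) : List (List Int) :=
  claves.zipIdx.foldl (fun v ai =>
    claves.foldl (fun v _ => v.modify ai.2 (fun row => row ++ [(0 : Int)])) (v ++ [([] : List Int)])) []

-- 'for k,c in enumerate(claves_alfabeto): if c == texto[j+1]: valores[i][k] += 1'  (t = texto[j+1])
def pvA_inner (claves : List String) (i : Nat) (t : Char) (v : List (List Int)) : List (List Int) :=
  claves.zipIdx.foldl (fun v ck =>
    if ck.1 = String.ofList [t] then v.modify i (fun row => row.modify ck.2 (· + 1)) else v) v

-- 'for j,b in enumerate(texto[:-1]): if a == b: <inner loop>'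
-- (texto[:-1] over the char list is dropLast — exact; texto[j+1] is PySem.List.pyGet?, always in range here)
def pvA_text (chars : List Char) (claves : List String) (a : String) (i : Nat)
    (v : List (List Int)) : List (List Int) :=
  chars.dropLast.zipIdx.foldl (fun v bj =>
    if a = String.ofList [bj.1] then
      match PySem.List.pyGet? chars ((bj.2 : Int) + 1) with
      | some t => pvA_inner claves i t v
      | none => v
    else v) v

def crear_valores_nivel_2 (texto : String) (claves_alfabeto : List String) : List (List Int) :=
  claves_alfabeto.zipIdx.foldl (fun v ai => pvA_text texto.toList claves_alfabeto ai.1 ai.2 v)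
    (pvA_init claves_alfabeto)

-- ===== PORT B =====
-- one pass over zip(texto, texto[1:]) building a bigram counter, then a table of lookups
def crear_valores_nivel_2_alt (texto : String) (claves_alfabeto : List String) : List (List Int) :=
  let chars := texto.toList
  let conteo := (chars.zip (chars.drop 1)).foldl
    (fun d p => d.insert (String.ofList [p.1], String.ofList [p.2])
      (d.getD (String.ofList [p.1], String.ofList [p.2]) 0 + 1))
    (PySem.Dict.empty : PySem.Dict (String × String) Int)
  claves_alfabeto.map (fun a => claves_alfabeto.map (fun c => conteo.getD (a, c) 0))

-- ===== PRECONDITION & SPEC =====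
def Spec_crear_valores_nivel_2 (texto : String) (claves_alfabeto : List String) (out : List (List Int)) : Prop := out = crear_valores_nivel_2_alt texto claves_alfabeto
instance (texto : String) (claves_alfabeto : List String) (out : List (List Int)) : Decidable (Spec_crear_valores_nivel_2 texto claves_alfabeto out) := by unfold Spec_crear_valores_nivel_2; infer_instance

-- ===== CLAIM (what is proved, stated in full; the proofs are below) =====
def Claim_equal_crear_valores_nivel_2 : Prop := ∀ (texto : String) (claves_alfabeto : List String), Dom_crear_valores_nivel_2 texto claves_alfabeto → Spec_crear_valores_nivel_2 texto claves_alfabeto (crear_valores_nivel_2 texto claves_alfabeto)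

-- ===== LEMMAS AND PROOFS =====

-- entry (i, k) of a matrix, 0 outside
def pvE (v : List (List Int)) (i k : Nat) : Int := (v[i]?.getD [])[k]?.getD 0

-- shape invariant: n rows, each of length n
def pvShape (n : Nat) (v : List (List Int)) : Prop :=
  v.length = n ∧ ∀ j < n, (v[j]?.getD []).length = n

-- the count A's text loop contributes to column k' of the row being built for alphabet letter a
def pvTc (chars : List Char) (claves : List String) (k' : Nat) (a : String) : Int :=
  ((chars.zip chars.tail).countP
    (fun p => decide (a = String.ofList [p.1] ∧ claves[k']? = some (String.ofList [p.2]))) : Int)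

lemma pvE_modify (v : List (List Int)) (i k i' k' : Nat) (hi : i < v.length)
    (hk : k < (v[i]?.getD []).length) :
    pvE (v.modify i (fun row => row.modify k (· + 1))) i' k'
      = pvE v i' k' + (if i' = i ∧ k' = k then 1 else 0) := by
  unfold pvE
  have hv : v[i]? = some (v[i]'hi) := List.getElem?_eq_getElem hi
  have hk2 : k < (v[i]'hi).length := by simpa [hv] using hk
  by_cases h1 : i' = i
  · subst h1
    simp only [List.getElem?_modify, hv, Option.map_some, if_pos rfl, Option.getD_some]
    by_cases h2 : k' = k
    · subst h2
      simp [List.getElem?_modify, List.getElem?_eq_getElem hk2]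
    · simp [List.getElem?_modify, Ne.symm h2, h2]
  · simp [List.getElem?_modify, Ne.symm h1, h1]

lemma pvShape_modify2 {n : Nat} (v : List (List Int)) (i k : Nat) (h : pvShape n v) :
    pvShape n (v.modify i (fun row => row.modify k (· + 1))) := by
  obtain ⟨hl, hr⟩ := h
  refine ⟨by simpa using hl, fun j hj => ?_⟩
  rw [List.getElem?_modify]
  by_cases h1 : i = j
  · subst h1
    cases hv : v[i]? with
    | none => simpa [hv] using hr i hj
    | some r => simpa [hv] using hr i hj
  · simp [h1]; exact hr j hj

lemma pvE_inner_gen (n i : Nat) (t : Char) (i' k' : Nat) (hi : i < n) :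
    ∀ (L : List (String × Nat)) (v : List (List Int)), pvShape n v → (∀ p ∈ L, p.2 < n) →
    pvE (L.foldl (fun v ck =>
        if ck.1 = String.ofList [t] then v.modify i (fun row => row.modify ck.2 (· + 1)) else v) v) i' k'
      = pvE v i' k'
        + (if i' = i then (L.countP (fun ck => decide (ck.1 = String.ofList [t] ∧ ck.2 = k')) : Int) else 0) := by
  intro L
  induction L with
  | nil => intro v hv _; simp
  | cons p L ih =>
    intro v hv hL
    simp only [List.foldl_cons, List.countP_cons]
    by_cases hp : p.1 = String.ofList [t]
    · rw [if_pos hp]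
      have hk : p.2 < (v[i]?.getD []).length := by
        rw [hv.2 i hi]; exact hL p (by simp)
      rw [ih _ (pvShape_modify2 _ _ _ hv) (fun q hq => hL q (by simp [hq])),
        pvE_modify v i p.2 i' k' (hv.1 ▸ hi) hk]
      by_cases h1 : i' = i <;> by_cases h2 : k' = p.2 <;>
        simp [h1, h2, hp, eq_comm] <;> push_cast <;> ring
    · rw [if_neg hp, ih _ hv (fun q hq => hL q (by simp [hq]))]
      simp [hp]

lemma pvShape_inner_gen {n : Nat} (i : Nat) (t : Char) :
    ∀ (L : List (String × Nat)) (v : List (List Int)), pvShape n v →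
    pvShape n (L.foldl (fun v ck =>
        if ck.1 = String.ofList [t] then v.modify i (fun row => row.modify ck.2 (· + 1)) else v) v) := by
  intro L
  induction L with
  | nil => intro v hv; simpa using hv
  | cons p L ih =>
    intro v hv
    simp only [List.foldl_cons]
    by_cases hp : p.1 = String.ofList [t]
    · rw [if_pos hp]; exact ih _ (pvShape_modify2 _ _ _ hv)
    · rw [if_neg hp]; exact ih _ hv

lemma countP_zipIdx_eq (cl : List String) (s : String) :
    ∀ (o k' : Nat),
    (cl.zipIdx o).countP (fun ck => decide (ck.1 = s ∧ ck.2 = k'))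
      = if o ≤ k' ∧ cl[k' - o]? = some s then 1 else 0 := by
  induction cl with
  | nil => intro o k'; simp
  | cons x cl ih =>
    intro o k'
    rw [List.zipIdx_cons, List.countP_cons, ih (o+1) k']
    by_cases h1 : o = k'
    · subst h1
      have : ¬ (o + 1 ≤ o) := by omega
      by_cases h2 : x = s <;> simp [h2, this]
    · have hoz : k' - o = (k' - (o+1)) + 1 ∨ k' < o := by omega
      rcases hoz with h | h
      · have ho : o ≤ k' := by omega
        simp [h, h1, ho, show o + 1 ≤ k' from by omega]
      · simp [h1, show ¬ (o ≤ k') from by omega, show ¬ (o+1 ≤ k') from by omega]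

lemma sum_zipIdx_single (f : String → Int) :
    ∀ (l : List String) (o i' : Nat),
    ((l.zipIdx o).map (fun ai => if ai.2 = i' then f ai.1 else 0)).sum
      = if o ≤ i' then (l[i' - o]?.map f).getD 0 else 0 := by
  intro l
  induction l with
  | nil => intro o i'; simp
  | cons x l ih =>
    intro o i'
    rw [List.zipIdx_cons, List.map_cons, List.sum_cons, ih (o+1) i']
    by_cases h1 : o = i'
    · subst h1; simp [show ¬ (o + 1 ≤ o) from by omega]
    · by_cases h2 : o ≤ i'
      · have h : i' - o = (i' - (o+1)) + 1 := by omega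
        simp [h1, h, h2, show o + 1 ≤ i' from by omega]
      · simp [h1, h2, show ¬ (o+1 ≤ i') from by omega]

lemma pvE_inner (cl : List String) (i : Nat) (t : Char) (i' k' : Nat) (hi : i < cl.length)
    (v : List (List Int)) (hv : pvShape cl.length v) :
    pvE (pvA_inner cl i t v) i' k'
      = pvE v i' k'
        + (if i' = i then (if cl[k']? = some (String.ofList [t]) then 1 else 0) else 0) := by
  unfold pvA_inner
  rw [pvE_inner_gen cl.length i t i' k' hi _ v hv
      (fun p hp => by simpa using List.snd_lt_add_of_mem_zipIdx hp),
    countP_zipIdx_eq cl (String.ofList [t]) 0 k']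
  simp

lemma pvShape_inner (cl : List String) (i : Nat) (t : Char) (v : List (List Int))
    (hv : pvShape cl.length v) : pvShape cl.length (pvA_inner cl i t v) := by
  exact pvShape_inner_gen i t _ v hv

lemma pvZipMap (chars : List Char) :
    (chars.dropLast.zipIdx.map (fun bj : Char × Nat => (bj.1, (chars[bj.2 + 1]?).getD default)))
      = chars.zip chars.tail := by
  apply List.ext_getElem
  · simp [List.length_zip, List.length_dropLast, List.length_tail]
  · intro j h1 h2
    have hj : j < chars.length - 1 := by simpa using h1
    have hj1 : j + 1 < chars.length := by omega
    simp [List.getElem_zipIdx, List.getElem_dropLast, List.getElem_zip, List.getElem_tail,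
      List.getElem?_eq_getElem hj1]

lemma pvA_text_eq_pairs (chars : List Char) (cl : List String) (a : String) (i : Nat)
    (v : List (List Int)) :
    pvA_text chars cl a i v
      = (chars.zip chars.tail).foldl
          (fun v p => if a = String.ofList [p.1] then pvA_inner cl i p.2 v else v) v := by
  unfold pvA_text
  rw [← pvZipMap chars, List.foldl_map]
  apply PySem.List.foldl_congr_mem
  intro acc bj hbj
  have hb : bj.2 < chars.length - 1 := by
    simpa using List.snd_lt_add_of_mem_zipIdx hbj
  have h1 : bj.2 + 1 < chars.length := by omega
  have : PySem.List.pyGet? chars ((bj.2 : Int) + 1) = chars[bj.2 + 1]? := by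
    rw [show ((bj.2 : Int) + 1) = ((bj.2 + 1 : Nat) : Int) from by push_cast; ring,
      PySem.List.pyGet?_natCast]
  simp [this, List.getElem?_eq_getElem h1]

lemma pvE_pairs (cl : List String) (a : String) (i i' k' : Nat) (hi : i < cl.length) :
    ∀ (q : List (Char × Char)) (v : List (List Int)), pvShape cl.length v →
    pvE (q.foldl (fun v p => if a = String.ofList [p.1] then pvA_inner cl i p.2 v else v) v) i' k'
      = pvE v i' k'
        + (if i' = i then (q.countP
            (fun p => decide (a = String.ofList [p.1] ∧ cl[k']? = some (String.ofList [p.2]))) : Int) else 0) := by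
  intro q
  induction q with
  | nil => intro v hv; simp
  | cons p q ih =>
    intro v hv
    simp only [List.foldl_cons, List.countP_cons]
    by_cases hp : a = String.ofList [p.1]
    · rw [if_pos hp, ih _ (pvShape_inner cl i p.2 v hv), pvE_inner cl i p.2 i' k' hi v hv]
      by_cases h1 : i' = i <;> by_cases h2 : cl[k']? = some (String.ofList [p.2]) <;>
        simp [h1, h2, hp] <;> push_cast <;> ring
    · rw [if_neg hp, ih _ hv]
      simp [hp]

lemma pvE_text (chars : List Char) (cl : List String) (a : String) (i i' k' : Nat)
    (hi : i < cl.length) :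
    ∀ (v : List (List Int)), pvShape cl.length v →
    pvE (pvA_text chars cl a i v) i' k'
      = pvE v i' k' + (if i' = i then pvTc chars cl k' a else 0) := by
  intro v hv
  rw [pvA_text_eq_pairs, pvE_pairs cl a i i' k' hi _ v hv]
  rfl

lemma pvShape_text (chars : List Char) (cl : List String) (a : String) (i : Nat)
    (v : List (List Int)) (hv : pvShape cl.length v) :
    pvShape cl.length (pvA_text chars cl a i v) := by
  rw [pvA_text_eq_pairs]
  induction (chars.zip chars.tail) generalizing v with
  | nil => simpa using hv
  | cons p q ih =>
    simp only [List.foldl_cons]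
    by_cases hp : a = String.ofList [p.1]
    · rw [if_pos hp]; exact ih _ (pvShape_inner cl i p.2 v hv)
    · rw [if_neg hp]; exact ih _ hv

lemma pvE_outer (chars : List Char) (cl : List String) (i' k' : Nat) :
    ∀ (L : List (String × Nat)) (v : List (List Int)), pvShape cl.length v →
    (∀ p ∈ L, p.2 < cl.length) →
    pvE (L.foldl (fun v ai => pvA_text chars cl ai.1 ai.2 v) v) i' k'
      = pvE v i' k'
        + ((L.map (fun ai => if ai.2 = i' then pvTc chars cl k' ai.1 else 0)).sum) := by
  intro L
  induction L with
  | nil => intro v hv _; simp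
  | cons p L ih =>
    intro v hv hL
    have hp2 : p.2 < cl.length := hL p (by simp)
    simp only [List.foldl_cons, List.map_cons, List.sum_cons]
    rw [ih _ (pvShape_text chars cl p.1 p.2 v hv) (fun q hq => hL q (by simp [hq])),
      pvE_text chars cl p.1 p.2 i' k' hp2 v hv]
    by_cases h1 : i' = p.2 <;> simp [h1, eq_comm] <;> ring

lemma pvShape_outer (chars : List Char) (cl : List String) :
    ∀ (L : List (String × Nat)) (v : List (List Int)), pvShape cl.length v →
    pvShape cl.length (L.foldl (fun v ai => pvA_text chars cl ai.1 ai.2 v) v) := by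
  intro L
  induction L with
  | nil => intro v hv; simpa using hv
  | cons p L ih =>
    intro v hv
    simp only [List.foldl_cons]
    exact ih _ (pvShape_text chars cl p.1 p.2 v hv)

lemma modify_append_last (v : List (List Int)) (x : List Int) (f : List Int → List Int) :
    (v ++ [x]).modify v.length f = v ++ [f x] := by
  induction v with
  | nil => simp
  | cons y v ih => simp [List.modify_cons, ih]

lemma pvA_init_row (m : List String) :
    ∀ (o : Nat) (v : List (List Int)) (x : List Int), v.length = o →
    m.foldl (fun v _ => v.modify o (fun row => row ++ [(0 : Int)])) (v ++ [x])
      = v ++ [x ++ List.replicate m.length 0] := by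
  induction m with
  | nil => intro o v x h; simp
  | cons y m ih =>
    intro o v x h
    subst h
    rw [List.foldl_cons, modify_append_last, ih v.length v _ rfl]
    simp [List.replicate_succ]

lemma pvA_init_gen (cl : List String) :
    ∀ (l : List String) (o : Nat) (v : List (List Int)), v.length = o →
    (l.zipIdx o).foldl (fun v ai =>
        cl.foldl (fun v _ => v.modify ai.2 (fun row => row ++ [(0 : Int)])) (v ++ [([] : List Int)])) v
      = v ++ List.replicate l.length (List.replicate cl.length 0) := by
  intro l
  induction l with
  | nil => intro o v h; simp
  | cons x l ih =>
    intro o v h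
    subst h
    rw [List.zipIdx_cons, List.foldl_cons, pvA_init_row cl v.length v _ rfl,
      ih (v.length+1) _ (by simp)]
    simp [List.replicate_succ]

lemma pvA_init_eq (cl : List String) :
    pvA_init cl = List.replicate cl.length (List.replicate cl.length 0) := by
  unfold pvA_init
  rw [pvA_init_gen cl cl 0 [] rfl]
  simp

lemma pvShape_init (cl : List String) : pvShape cl.length (pvA_init cl) := by
  rw [pvA_init_eq]
  constructor
  · simp
  · intro j hj
    rw [List.getElem?_eq_getElem (by simpa using hj)]
    simp

lemma pvE_init (cl : List String) (i k : Nat) : pvE (pvA_init cl) i k = 0 := by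
  simp only [pvE, pvA_init_eq, List.getElem?_replicate]
  split_ifs <;> simp [List.getElem?_replicate] <;> split_ifs <;> simp

-- ===== VERDICT (by name: the statement is the Claim_ definition above) =====
theorem crear_valores_nivel_2_spec : Claim_equal_crear_valores_nivel_2 := by
  intro texto cl _
  unfold Spec_crear_valores_nivel_2

  unfold crear_valores_nivel_2 crear_valores_nivel_2_alt
  have hcnt : (texto.toList.zip (texto.toList.drop 1)).foldl
      (fun d p => d.insert (String.ofList [p.1], String.ofList [p.2])
        (d.getD (String.ofList [p.1], String.ofList [p.2]) 0 + 1))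
      (PySem.Dict.empty : PySem.Dict (String × String) Int)
      = PySem.Dict.counter ((texto.toList.zip (texto.toList.drop 1)).map
          (fun p => (String.ofList [p.1], String.ofList [p.2]))) := by
    rw [← PySem.Dict.foldl_insert_getD_add_one_eq_counter, List.foldl_map]
  simp only [hcnt]
  have hsh : pvShape cl.length
      (cl.zipIdx.foldl (fun v ai => pvA_text texto.toList cl ai.1 ai.2 v) (pvA_init cl)) :=
    pvShape_outer texto.toList cl _ _ (pvShape_init cl)
  apply List.ext_getElem
  · rw [hsh.1]; simp
  · intro i h1 h2
    have hi : i < cl.length := by rwa [hsh.1] at h1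
    have hrowA : (cl.zipIdx.foldl (fun v ai => pvA_text texto.toList cl ai.1 ai.2 v)
        (pvA_init cl))[i]
        = ((cl.zipIdx.foldl (fun v ai => pvA_text texto.toList cl ai.1 ai.2 v)
          (pvA_init cl))[i]?.getD []) := by
      rw [List.getElem?_eq_getElem h1]; rfl
    apply List.ext_getElem
    · rw [hrowA, hsh.2 i hi]; simp
    · intro k hk1 hk2
      have hk : k < cl.length := by rw [hrowA, hsh.2 i hi] at hk1; exact hk1
      have hEA : pvE (cl.zipIdx.foldl (fun v ai => pvA_text texto.toList cl ai.1 ai.2 v)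
          (pvA_init cl)) i k
          = (cl.zipIdx.foldl (fun v ai => pvA_text texto.toList cl ai.1 ai.2 v)
            (pvA_init cl))[i][k] := by
        unfold pvE
        rw [List.getElem?_eq_getElem h1]
        simp only [Option.getD_some]
        rw [List.getElem?_eq_getElem hk1]
        simp only [Option.getD_some]
      rw [← hEA, pvE_outer texto.toList cl i k _ _ (pvShape_init cl)
          (fun p hp => by simpa using List.snd_lt_add_of_mem_zipIdx hp),
        pvE_init, sum_zipIdx_single (pvTc texto.toList cl k) cl 0 i]
      simp only [Nat.zero_le, if_true, Nat.sub_zero, List.getElem?_eq_getElem hi,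
        Option.map_some, Option.getD_some, zero_add]
      simp only [List.getElem_map]
      rw [PySem.Dict.getD_counter]
      unfold pvTc
      rw [List.count_eq_countP, List.countP_map]
      simp only [List.drop_one]
      congr 1
      apply List.countP_congr
      intro p _
      simp only [Function.comp_apply, decide_eq_true_eq, beq_iff_eq, Prod.mk.injEq,
        List.getElem?_eq_getElem hk, Option.some.injEq]
      exact ⟨fun h => ⟨h.1.symm, h.2.symm⟩, fun h => ⟨h.1.symm, h.2.symm⟩⟩
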